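-- pv_equiv track=rewrite | github.com/maruftalukdar123/CodeSignal-Arcade-Intro | Array Change/Solution.py | solution
-- ===== SOURCE A (Python) =====
-- def solution(a):
--
--     moves = 0
--
--     for i in range(1,len(a)):
--         if a[i] < a[i-1]:
--             moves += (-a[i] + a[i-1] + 1)
--             a[i] = a[i-1]+1
--         if a[i] == a[i-1]:
--             moves += 1
--             a[i] = a[i-1]+1
--
--
--     return moves
-- ===== SOURCE B (Python) =====
-- def solution(a):
--     # Closed form: the final value at position i is i + max_{j<=i}(a[j]-j), so each
--     # element's contribution is (i + best) - a[i] with best a running maximum of a[j]-j.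
--     # (Unlike A, this never mutates a; equivalence is about the return value.)
--     moves = 0
--     best = None
--     for i, x in enumerate(a):
--         c = x - i
--         if best is None or c > best:
--             best = c
--         moves += i + best - x
--     return moves
-- ===== Notes on version B (the rewrite author's own statement) =====
-- stated objective: alternative
-- what changed: B never simulates raising the array: instead of A's in-place rewrite a[i]=a[i-1]+1 with a per-step moves counter, B uses the closed form final[i] = i + max_{j<=i}(a[j]-j), maintaining one running maximum of a[j]-j and summing (i + best) - a[i]; a is not mutated.
import Mathlib
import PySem

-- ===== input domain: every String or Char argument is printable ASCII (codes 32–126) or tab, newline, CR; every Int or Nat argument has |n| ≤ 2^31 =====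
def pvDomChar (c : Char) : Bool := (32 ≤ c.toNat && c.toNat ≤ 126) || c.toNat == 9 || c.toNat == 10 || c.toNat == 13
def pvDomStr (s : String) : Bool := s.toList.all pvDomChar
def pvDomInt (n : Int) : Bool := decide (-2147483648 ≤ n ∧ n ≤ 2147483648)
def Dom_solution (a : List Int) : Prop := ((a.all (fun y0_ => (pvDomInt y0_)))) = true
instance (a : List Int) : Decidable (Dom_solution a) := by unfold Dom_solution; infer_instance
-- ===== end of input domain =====

-- B replaces A's in-place raising simulation by the closed form final[i] = i + max_{j≤i}(a[j]-j),
-- summing (i + best) - a[i] over one running maximum (objective: alternative).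
-- A mutates the Python list in place, B does not; the equivalence proved is about the return value only.

-- ===== PORT A =====
-- one iteration of A's loop body: state = (current list, moves); indices are always in range
def solutionStepA (st : List Int × Int) (i : Int) : List Int × Int :=
  let a := st.1
  let moves := st.2
  let st1 : List Int × Int :=
    if PySem.List.pyGetD a i 0 < PySem.List.pyGetD a (i - 1) 0 then
      (PySem.List.pySetD a i (PySem.List.pyGetD a (i - 1) 0 + 1),
       moves + (-(PySem.List.pyGetD a i 0) + PySem.List.pyGetD a (i - 1) 0 + 1))
    else (a, moves)
  let a := st1.1
  let moves := st1.2
  if PySem.List.pyGetD a i 0 = PySem.List.pyGetD a (i - 1) 0 then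
    (PySem.List.pySetD a i (PySem.List.pyGetD a (i - 1) 0 + 1), moves + 1)
  else (a, moves)

def solution (a : List Int) : Int :=
  ((PySem.List.pyRange 1 a.length 1).foldl solutionStepA (a, 0)).2

-- ===== PORT B =====
-- one iteration of B's loop body: state = (moves, best : Option Int), element = (i, x)
def solutionStepB (st : Int × Option Int) (p : Int × Int) : Int × Option Int :=
  let c := p.2 - p.1
  let best : Int :=
    match st.2 with
    | none => c
    | some b => if c > b then c else b
  (st.1 + (p.1 + best - p.2), some best)

def solution_alt (a : List Int) : Int :=
  ((PySem.List.enumerate a 0).foldl solutionStepB (0, none)).1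

-- ===== PRECONDITION & SPEC =====
def Spec_solution (a : List Int) (out : Int) : Prop := out = solution_alt a
instance (a : List Int) (out : Int) : Decidable (Spec_solution a out) := by unfold Spec_solution; infer_instance

-- ===== CLAIM (what is proved, stated in full; the proofs are below) =====
def Claim_equal_solution : Prop := ∀ (a : List Int), Dom_solution a → Spec_solution a (solution a)

-- ===== LEMMAS AND PROOFS =====

-- proof-side reference: the raising pass as structural recursion, and its move count
def raiseList (prev : Int) : List Int → List Int
  | [] => []
  | x :: xs => max x (prev + 1) :: raiseList (max x (prev + 1)) xs

def goA (prev : Int) : List Int → Int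
  | [] => 0
  | x :: xs => (max x (prev + 1) - x) + goA (max x (prev + 1)) xs

-- the raising step alone (A's list update, without the moves bookkeeping)
def stepR (a : List Int) (i : Int) : List Int :=
  if PySem.List.pyGetD a i 0 ≤ PySem.List.pyGetD a (i - 1) 0 then
    PySem.List.pySetD a i (PySem.List.pyGetD a (i - 1) 0 + 1)
  else a

lemma stepR_length (a : List Int) (i : Int) : (stepR a i).length = a.length := by
  unfold stepR; split <;> simp [PySem.List.length_pySetD]

-- one step of A = raising step + the sum increase as the moves delta
lemma stepA_eq (a : List Int) (m i : Int) (h1 : 1 ≤ i) (h2 : i < (a.length : Int)) :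
    solutionStepA (a, m) i = (stepR a i, m + ((stepR a i).sum - a.sum)) := by
  have hi0 : (0 : Int) ≤ i := by omega
  have hi1 : (0 : Int) ≤ i - 1 := by omega
  have hnat : i.toNat < a.length := by omega
  simp only [solutionStepA, stepR]
  rw [PySem.List.pyGetD_eq_getElem a 0 hi0 h2,
      PySem.List.pyGetD_eq_getElem a 0 hi1 (by omega),
      PySem.List.pySetD_of_nonneg a _ hi0]
  by_cases hlt : a[i.toNat] < a[(i - 1).toNat]
  · simp only [if_pos hlt, if_pos (le_of_lt hlt)]
    rw [PySem.List.pyGetD_eq_getElem _ 0 hi0 (by simpa using h2),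
        PySem.List.pyGetD_eq_getElem _ 0 hi1 (by simp; omega)]
    simp only [List.getElem_set]
    rw [if_neg (by omega)]
    rw [List.sum_set' a i.toNat]
    simp only [hnat, dif_pos]
    simp only [Prod.mk.injEq, true_and]
    ring
  · by_cases heq : a[i.toNat] = a[(i - 1).toNat]
    · simp only [if_neg hlt, if_pos (le_of_eq heq)]
      rw [PySem.List.pyGetD_eq_getElem a 0 hi0 h2,
          PySem.List.pyGetD_eq_getElem a 0 hi1 (by omega),
          PySem.List.pySetD_of_nonneg a _ hi0]
      rw [if_pos heq]
      rw [List.sum_set' a i.toNat]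
      simp only [hnat, dif_pos]
      simp only [Prod.mk.injEq, true_and]
      rw [heq]; ring
    · simp only [if_neg hlt, if_neg (show ¬ a[i.toNat] ≤ a[(i - 1).toNat] by omega)]
      rw [PySem.List.pyGetD_eq_getElem a 0 hi0 h2,
          PySem.List.pyGetD_eq_getElem a 0 hi1 (by omega)]
      rw [if_neg heq]
      simp only [Prod.mk.injEq, true_and]
      ring

lemma foldA_eq (l : List Int) : ∀ (a : List Int) (m : Int),
    (∀ i ∈ l, 1 ≤ i ∧ i < (a.length : Int)) →
    l.foldl solutionStepA (a, m) = (l.foldl stepR a, m + ((l.foldl stepR a).sum - a.sum)) := by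
  induction l with
  | nil => intro a m _; simp
  | cons i l ih =>
    intro a m hb
    obtain ⟨h1, h2⟩ := hb i (by simp)
    simp only [List.foldl_cons]
    rw [stepA_eq a m i h1 h2]
    rw [ih (stepR a i) _ (by
      intro j hj
      rw [stepR_length]
      exact hb j (by simp [hj]))]
    simp only [Prod.mk.injEq, true_and]
    ring

lemma pyGetD_cons_succ (x v : Int) (L : List Int) (i : Int) (h : 0 ≤ i) :
    PySem.List.pyGetD (x :: L) (i + 1) v = PySem.List.pyGetD L i v := by
  obtain ⟨k, rfl⟩ := Int.eq_ofNat_of_zero_le h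
  rw [show (k : Int) + 1 = ((k + 1 : Nat) : Int) by push_cast; ring,
      PySem.List.pyGetD_natCast, PySem.List.pyGetD_natCast]
  simp

lemma pySetD_cons_succ (x v : Int) (L : List Int) (i : Int) (h : 0 ≤ i) :
    PySem.List.pySetD (x :: L) (i + 1) v = x :: PySem.List.pySetD L i v := by
  obtain ⟨k, rfl⟩ := Int.eq_ofNat_of_zero_le h
  rw [show (k : Int) + 1 = ((k + 1 : Nat) : Int) by push_cast; ring,
      PySem.List.pySetD_natCast, PySem.List.pySetD_natCast]
  simp

lemma stepR_cons (prev : Int) (L : List Int) (i : Int) (h1 : 1 ≤ i) :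
    stepR (prev :: L) (i + 1) = prev :: stepR L i := by
  unfold stepR
  rw [pyGetD_cons_succ prev 0 L i (by omega),
      show i + 1 - 1 = (i - 1) + 1 by ring,
      pyGetD_cons_succ prev 0 L (i - 1) (by omega),
      pySetD_cons_succ prev _ L i (by omega)]
  split <;> rfl

lemma foldR_shift (l : List Int) : ∀ (prev : Int) (L : List Int), (∀ i ∈ l, 1 ≤ i) →
    (l.map (· + 1)).foldl stepR (prev :: L) = prev :: l.foldl stepR L := by
  induction l with
  | nil => intro prev L _; simp
  | cons i l ih =>
    intro prev L hb
    simp only [List.map_cons, List.foldl_cons]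
    rw [stepR_cons prev L i (hb i (by simp))]
    exact ih prev _ (fun j hj => hb j (by simp [hj]))

lemma foldR_eq_raise (xs : List Int) : ∀ prev : Int,
    (PySem.List.pyRange 1 ((xs.length : Int) + 1) 1).foldl stepR (prev :: xs)
      = prev :: raiseList prev xs := by
  induction xs with
  | nil =>
    intro prev
    rw [PySem.List.pyRange_one_eq_nil (by simp)]
    simp [raiseList]
  | cons x xs ih =>
    intro prev
    rw [PySem.List.pyRange_one_cons (by simp only [List.length_cons]; push_cast; omega)]
    simp only [List.foldl_cons]
    have g1 : PySem.List.pyGetD (prev :: x :: xs) 1 0 = x := by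
      simpa using pyGetD_cons_succ prev 0 (x :: xs) 0 le_rfl
    have hstep : stepR (prev :: x :: xs) 1 = prev :: max x (prev + 1) :: xs := by
      unfold stepR
      rw [show (1 : Int) - 1 = 0 by ring, PySem.List.pyGetD_zero_cons, g1,
          PySem.List.pySetD_of_nonneg _ _ (by norm_num : (0 : Int) ≤ 1)]
      split <;> · simp; omega
    rw [hstep]
    have hrange : PySem.List.pyRange 2 (((x :: xs).length : Int) + 1) 1
        = (PySem.List.pyRange 1 ((xs.length : Int) + 1) 1).map (· + 1) := by
      rw [PySem.List.pyRange_one, PySem.List.pyRange_one, List.map_map]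
      have he : (((x :: xs).length : Int) + 1 - 2).toNat = ((xs.length : Int) + 1 - 1).toNat := by
        simp; omega
      rw [he]
      apply List.map_congr_left
      intro k _
      simp
      ring
    rw [show (1 : Int) + 1 = 2 by ring, hrange,
        foldR_shift _ _ _ (fun i hi => (PySem.List.mem_pyRange_one.1 hi).1), ih]
    rfl

lemma raiseList_sum (xs : List Int) : ∀ prev : Int,
    (raiseList prev xs).sum - xs.sum = goA prev xs := by
  induction xs with
  | nil => intro prev; simp [raiseList, goA]
  | cons x xs ih =>
    intro prev
    simp only [raiseList, goA, List.sum_cons]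
    have := ih (max x (prev + 1))
    omega

lemma solution_eq_goA (a : List Int) :
    solution a = match a with | [] => 0 | x :: xs => goA x xs := by
  match a with
  | [] => simp [solution, PySem.List.pyRange_one_eq_nil]
  | x :: xs =>
    unfold solution
    rw [foldA_eq _ _ _ (by
      intro i hi
      have := PySem.List.mem_pyRange_one.1 hi
      constructor <;> [exact this.1; simpa using this.2])]
    have hlen : (((x :: xs).length : Nat) : Int) = (xs.length : Int) + 1 := by simp
    rw [hlen, foldR_eq_raise xs x]
    simp only [List.sum_cons]
    have := raiseList_sum xs x
    omega

lemma foldB_eq (xs : List Int) : ∀ (i b m : Int),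
    ((PySem.List.enumerate xs i).foldl solutionStepB (m, some b)).1
      = m + goA (i - 1 + b) xs := by
  induction xs with
  | nil => intro i b m; simp [PySem.List.enumerate_nil, goA]
  | cons x xs ih =>
    intro i b m
    rw [PySem.List.enumerate_cons]
    simp only [List.foldl_cons, solutionStepB]
    rw [ih]
    have hb : (if x - i > b then x - i else b) = max (x - i) b := by split <;> omega
    simp only [hb, goA]
    have h1 : max x ((i - 1 + b) + 1) = i + max (x - i) b := by omega
    have h2 : i + 1 - 1 + max (x - i) b = max x ((i - 1 + b) + 1) := by omega
    rw [h2, h1]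
    ring

lemma solution_alt_eq_goA (a : List Int) :
    solution_alt a = match a with | [] => 0 | x :: xs => goA x xs := by
  match a with
  | [] => simp [solution_alt, PySem.List.enumerate_nil]
  | x :: xs =>
    unfold solution_alt
    rw [PySem.List.enumerate_cons]
    simp only [List.foldl_cons, solutionStepB]
    rw [foldB_eq]
    have : (0 : Int) + 1 - 1 + (x - 0) = x := by ring
    rw [this]
    ring

-- ===== VERDICT (by name: the statement is the Claim_ definition above) =====
theorem solution_spec : Claim_equal_solution := by
  intro a _
  unfold Spec_solution
  rw [solution_eq_goA, solution_alt_eq_goA]
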